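-- pv_equiv track=rewrite | github.com/renta0426/NVIDIA-Nemotron-Model-Reasoning-Challenge | data/symbol_rule_analysis_2026-04-20/analyze_symbol_rules.py | core_iter_family_assignments
-- ===== SOURCE A (Python) =====
-- def core_iter_family_assignments(family_options: dict[str, list[str]], max_assignments: int):
--     ordered = sorted(family_options, key=lambda op: (len(family_options[op]), op))
--
--     def recurse(index: int, current: dict[str, str]):
--         if recurse.generated >= max_assignments:
--             return
--         if index == len(ordered):
--             recurse.generated += 1
--             yield current.copy()
--             return
--         operator_symbol = ordered[index]
--         for family_name in family_options[operator_symbol]: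
--             current[operator_symbol] = family_name
--             yield from recurse(index + 1, current)
--             current.pop(operator_symbol)
--
--     recurse.generated = 0
--     yield from recurse(0, {})
-- ===== SOURCE B (Python) =====
-- def core_iter_family_assignments(family_options: dict[str, list[str]], max_assignments: int):
--     # Iterative mixed-radix odometer over the sorted keys instead of a capped recursion:
--     # keep an index vector and the matching value vector, yield dict(zip(...)) snapshots,
--     # and increment the rightmost digit (with carry) between yields.
--     ordered = sorted(family_options, key=lambda op: (len(family_options[op]), op))
--     pools = [family_options[op] for op in ordered]
--     total = 1
--     for p in pools:
--         total *= len(p)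
--     count = total if total < max_assignments else max_assignments
--     if count > 0:
--         idx = [0] * len(pools)
--         vals = [p[0] for p in pools]
--         while True:
--             yield dict(zip(ordered, vals))
--             count -= 1
--             if count == 0:
--                 return
--             j = len(pools) - 1  # count > 0 means a non-final tuple exists, so j never underflows
--             while True:
--                 i = idx[j] + 1
--                 if i < len(pools[j]):
--                     idx[j] = i
--                     vals[j] = pools[j][i]
--                     break
--                 idx[j] = 0
--                 vals[j] = pools[j][0]
--                 j -= 1
-- ===== Notes on version B (the rewrite author's own statement) =====
-- stated objective: alternative
-- what changed: Replaces the capped depth-first generator recursion (mutated current dict, shared generated counter) by an iterative mixed-radix odometer: an index vector plus its value vector are incremented with carry between yields, and each assignment is emitted as dict(zip(ordered, vals)).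
import Mathlib
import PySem

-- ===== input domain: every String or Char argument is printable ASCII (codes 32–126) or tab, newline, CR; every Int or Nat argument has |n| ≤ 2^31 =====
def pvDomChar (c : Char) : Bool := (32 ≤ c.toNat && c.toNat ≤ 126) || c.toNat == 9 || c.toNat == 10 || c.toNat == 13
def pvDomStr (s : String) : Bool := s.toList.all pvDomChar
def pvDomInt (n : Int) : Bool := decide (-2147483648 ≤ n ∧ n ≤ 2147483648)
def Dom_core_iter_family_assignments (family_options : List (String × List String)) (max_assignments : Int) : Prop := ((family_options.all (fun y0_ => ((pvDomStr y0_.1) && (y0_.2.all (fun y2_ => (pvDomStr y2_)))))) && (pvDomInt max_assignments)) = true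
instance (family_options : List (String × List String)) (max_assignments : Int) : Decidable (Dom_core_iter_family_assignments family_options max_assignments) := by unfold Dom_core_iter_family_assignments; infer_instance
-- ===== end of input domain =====

-- ===== PORT A =====
-- A yields assignment dicts from a capped depth-first recursion over the sorted keys;
-- the generator is ported as the list of all yielded dicts (as key-value item lists).
-- The Python mutation current[op]=...; recurse; current.pop(op) is the immutable
-- 'current.insert op fam' passed to the recursive call (current itself is unchanged after).
def pvRecurseA (d : PySem.Dict String (List String)) (ma : Int) :
    List String → PySem.Dict String String → Int → (List (List (String × String)) × Int)
  | [], current, gen =>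
      if ma ≤ gen then ([], gen) else ([current.items], gen + 1)
  | op :: rest, current, gen =>
      if ma ≤ gen then ([], gen)
      else
        (d.getD op []).foldl
          (fun st fam =>
            let r := pvRecurseA d ma rest (current.insert op fam) st.2
            (st.1 ++ r.1, r.2))
          ([], gen)

def core_iter_family_assignments (family_options : List (String × List String)) (max_assignments : Int) : List (List (String × String)) :=
  let d := PySem.Dict.ofList family_options
  let ordered := PySem.List.sorted2 d.keys (fun op => PySem.List.len (d.getD op [])) (fun op => op)
  (pvRecurseA d max_assignments ordered PySem.Dict.empty 0).1

-- ===== PORT B =====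
-- B walks the product with a mixed-radix odometer: an index vector idx and the matching
-- value vector vals, yielding dict(zip(ordered, vals)) and incrementing the rightmost
-- digit with carry between yields. dict(zip(ordered, vals)) is ported as ordered.zip vals:
-- the sorted dict keys are distinct, so the dict's items are exactly that zip.

-- the inner 'while True: j -= 1' carry loop, as right-to-left structural recursion;
-- Bool = 'still carrying past this digit'. Python's pools[j][i] is always in range when
-- the loop runs (guarded by count > 0), ported as getD; the underflow of j below 0 is
-- unreachable for the same reason (the catch-all returns a carry).
def pvStep : List (List String) → List Nat → List String → (List Nat × List String × Bool)
  | p :: ps, i :: is, v :: vs =>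
      let s := pvStep ps is vs
      if s.2.2 then
        if i + 1 < p.length then ((i + 1) :: s.1, p.getD (i + 1) "" :: s.2.1, false)
        else (0 :: s.1, p.getD 0 "" :: s.2.1, true)
      else (i :: s.1, v :: s.2.1, false)
  | _, _, _ => ([], [], true)

def pvOdo (ordered : List String) (pools : List (List String)) :
    Nat → List Nat → List String → List (List (String × String))
  | 0, _, _ => []
  | 1, _, vals => [ordered.zip vals]
  | n + 2, idx, vals =>
      let s := pvStep pools idx vals
      ordered.zip vals :: pvOdo ordered pools (n + 1) s.1 s.2.1

def core_iter_family_assignments_alt (family_options : List (String × List String)) (max_assignments : Int) : List (List (String × String)) :=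
  let d := PySem.Dict.ofList family_options
  let ordered := PySem.List.sorted2 d.keys (fun op => PySem.List.len (d.getD op [])) (fun op => op)
  let pools := ordered.map (fun op => d.getD op [])
  let total := pools.foldl (fun acc p => acc * PySem.List.len p) 1
  let count := if total < max_assignments then total else max_assignments
  pvOdo ordered pools count.toNat (List.replicate pools.length 0) (pools.map (fun p => p.getD 0 ""))

-- ===== PRECONDITION & SPEC =====
def Spec_core_iter_family_assignments (family_options : List (String × List String)) (max_assignments : Int) (out : List (List (String × String))) : Prop := out = core_iter_family_assignments_alt family_options max_assignments
instance (family_options : List (String × List String)) (max_assignments : Int) (out : List (List (String × String))) : Decidable (Spec_core_iter_family_assignments family_options max_assignments out) := by unfold Spec_core_iter_family_assignments; infer_instance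

-- ===== CLAIM (what is proved, stated in full; the proofs are below) =====
def Claim_equal_core_iter_family_assignments : Prop := ∀ (family_options : List (String × List String)) (max_assignments : Int), Dom_core_iter_family_assignments family_options max_assignments → Spec_core_iter_family_assignments family_options max_assignments (core_iter_family_assignments family_options max_assignments)

-- ===== LEMMAS AND PROOFS =====

-- full (uncapped) product of assignments for the remaining keys, in A's recursion order
def pvProd (opts : String → List String) : List String → PySem.Dict String String → List (PySem.Dict String String)
  | [], c => [c]
  | op :: rest, c => (opts op).flatMap (fun fam => pvProd opts rest (c.insert op fam))

-- the same product as plain value tuples, and the suffix of it that starts at digit vector idx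
def pvProdT : List (List String) → List (List String)
  | [] => [[]]
  | p :: ps => p.flatMap (fun x => (pvProdT ps).map (x :: ·))

def pvRem : List (List String) → List Nat → List (List String)
  | [], _ => [[]]
  | _ :: _, [] => [[]]
  | p :: ps, i :: is =>
      (pvRem ps is).map (fun t => p.getD i "" :: t)
        ++ (p.drop (i + 1)).flatMap (fun x => (pvProdT ps).map (x :: ·))

def pvLenT : List (List String) → Nat
  | [] => 1
  | p :: ps => p.length * pvLenT ps

lemma pvProdT_length : ∀ ps, (pvProdT ps).length = pvLenT ps := by
  intro ps
  induction ps with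
  | nil => rfl
  | cons p ps ih => simp [pvProdT, pvLenT, List.length_flatMap, ih]
-- A's recursion computes the capped prefix of the full product, threading the counter
lemma pvRecurseA_eq (d : PySem.Dict String (List String)) (ma : Int) :
    ∀ (rest : List String) (current : PySem.Dict String String) (gen : Int),
      pvRecurseA d ma rest current gen =
        ((List.take (ma - gen).toNat (pvProd (fun op => d.getD op []) rest current)).map (fun c => c.items),
         gen + (List.take (ma - gen).toNat (pvProd (fun op => d.getD op []) rest current)).length) := by
  intro rest
  induction rest with
  | nil =>
      intro current gen
      by_cases h : ma ≤ gen
      · have h0 : (ma - gen).toNat = 0 := by omega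
        simp [pvRecurseA, h, h0, pvProd]
      · obtain ⟨j, hj⟩ : ∃ j, (ma - gen).toNat = j + 1 := ⟨(ma - gen).toNat - 1, by omega⟩
        simp [pvRecurseA, h, pvProd, hj]
  | cons op rest ih =>
      intro current gen
      by_cases h : ma ≤ gen
      · have h0 : (ma - gen).toNat = 0 := by omega
        simp [pvRecurseA, h, h0]
      · have inner : ∀ (l : List String) (gen : Int) (acc : List (List (String × String))),
            l.foldl
              (fun st fam =>
                let r := pvRecurseA d ma rest (current.insert op fam) st.2
                (st.1 ++ r.1, r.2)) (acc, gen)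
            = (acc ++ (List.take (ma - gen).toNat
                  (l.flatMap (fun fam => pvProd (fun o => d.getD o []) rest (current.insert op fam)))).map
                  (fun c => c.items),
               gen + (List.take (ma - gen).toNat
                  (l.flatMap (fun fam => pvProd (fun o => d.getD o []) rest (current.insert op fam)))).length) := by
          intro l
          induction l with
          | nil => intro gen acc; simp
          | cons fam l ihl =>
              intro gen acc
              simp only [List.foldl_cons]
              rw [ih (current.insert op fam) gen]
              rw [ihl]
              simp only [List.flatMap_cons]
              rw [List.take_append]
              have hmin : (List.take (ma - gen).toNat
                  (pvProd (fun o => d.getD o []) rest (current.insert op fam))).length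
                  = min ((ma - gen).toNat)
                    (pvProd (fun o => d.getD o []) rest (current.insert op fam)).length :=
                List.length_take
              have harith : (ma - (gen + ((List.take (ma - gen).toNat
                  (pvProd (fun o => d.getD o []) rest (current.insert op fam))).length : Int))).toNat
                  = (ma - gen).toNat
                    - (pvProd (fun o => d.getD o []) rest (current.insert op fam)).length := by
                omega
              rw [harith]
              simp [List.map_append, List.length_append]
              omega
        rw [pvRecurseA, if_neg h, inner (d.getD op []) gen []]
        simp [pvProd]

lemma pv_nonempty_of_lenT_pos : ∀ (ps : List (List String)), 0 < pvLenT ps → ∀ p ∈ ps, p ≠ [] := by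
  intro ps
  induction ps with
  | nil => simp
  | cons p ps ih =>
      intro hpos q hq
      rw [pvLenT] at hpos
      rcases List.mem_cons.mp hq with rfl | hq'
      · intro h0; rw [h0] at hpos; simp at hpos
      · have hne : pvLenT ps ≠ 0 := by
          intro h0; rw [h0, Nat.mul_zero] at hpos; omega
        exact ih (Nat.pos_of_ne_zero hne) q hq'

lemma pv_forall2_zeros : ∀ (ps : List (List String)), (∀ p ∈ ps, p ≠ []) →
    List.Forall₂ (fun (p : List String) (i : Nat) => i < p.length) ps (List.replicate ps.length 0) := by
  intro ps
  induction ps with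
  | nil => intro _; simp
  | cons p ps ih =>
      intro h
      rw [List.length_cons, List.replicate_succ]
      exact List.Forall₂.cons (List.length_pos_iff.mpr (h p (List.mem_cons_self ..)))
        (ih (fun q hq => h q (List.mem_cons_of_mem _ hq)))

lemma pv_zipWith_replicate : ∀ (ps : List (List String)),
    List.zipWith (fun (p : List String) (i : Nat) => p.getD i "") ps (List.replicate ps.length 0)
      = ps.map (fun p => p.getD 0 "") := by
  intro ps
  induction ps with
  | nil => rfl
  | cons p ps ih =>
      rw [List.length_cons, List.replicate_succ]
      simp only [List.zipWith_cons_cons, List.map_cons]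
      rw [ih]

lemma pvRem_zeros : ∀ (ps : List (List String)), (∀ p ∈ ps, p ≠ []) →
    pvRem ps (List.replicate ps.length 0) = pvProdT ps := by
  intro ps
  induction ps with
  | nil => intro _; rfl
  | cons p ps ih =>
      intro h
      rw [List.length_cons, List.replicate_succ, pvRem,
        ih (fun q hq => h q (List.mem_cons_of_mem _ hq))]
      obtain ⟨a, as, rfl⟩ := List.exists_cons_of_ne_nil (h p (List.mem_cons_self ..))
      simp [pvProdT]

lemma pv_forall2_nonempty {ps : List (List String)} {is : List Nat}
    (h : List.Forall₂ (fun (p : List String) (i : Nat) => i < p.length) ps is) :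
    ∀ p ∈ ps, p ≠ [] := by
  induction h with
  | nil => simp
  | cons hpi h ih =>
      intro q hq
      rcases List.mem_cons.mp hq with rfl | hq'
      · exact List.ne_nil_of_length_pos (by omega)
      · exact ih q hq'

-- one odometer step: either the digit vector was the last one (carry out, everything
-- reset to zero), or the remaining-suffix list loses exactly its head
lemma pvStep_spec :
    ∀ (pools : List (List String)) (idx : List Nat) (vals : List String),
      List.Forall₂ (fun (p : List String) (i : Nat) => i < p.length) pools idx →
      vals = List.zipWith (fun p i => p.getD i "") pools idx →
      ((pvStep pools idx vals).2.2 = true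
          ∧ pvRem pools idx = [vals]
          ∧ (pvStep pools idx vals).1 = List.replicate pools.length 0
          ∧ (pvStep pools idx vals).2.1 = pools.map (fun p => p.getD 0 ""))
      ∨ ((pvStep pools idx vals).2.2 = false
          ∧ pvRem pools idx = vals :: pvRem pools (pvStep pools idx vals).1
          ∧ List.Forall₂ (fun (p : List String) (i : Nat) => i < p.length) pools (pvStep pools idx vals).1
          ∧ (pvStep pools idx vals).2.1
              = List.zipWith (fun p i => p.getD i "") pools (pvStep pools idx vals).1) := by
  intro pools idx vals h hv
  induction h generalizing vals with
  | nil =>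
      subst hv
      exact Or.inl ⟨rfl, rfl, rfl, rfl⟩
  | @cons p i ps is hpi htail ih =>
      subst hv
      simp only [List.zipWith_cons_cons]
      rcases ih (List.zipWith (fun p i => p.getD i "") ps is) rfl with
        ⟨hc, hrem, hidx0, hvals0⟩ | ⟨hc, hrem, hval2, hzip2⟩
      · -- tail carried: the tail digits were the last tuple and got reset to zero
        have hne := pv_forall2_nonempty htail
        by_cases hlt : i + 1 < p.length
        · right
          have hstep : pvStep (p :: ps) (i :: is)
              (p.getD i "" :: List.zipWith (fun p i => p.getD i "") ps is)
              = ((i + 1) :: List.replicate ps.length 0,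
                 p.getD (i + 1) "" :: ps.map (fun p => p.getD 0 ""), false) := by
            simp only [pvStep]
            rw [hc, if_pos rfl, if_pos hlt, hidx0, hvals0]
          rw [hstep]
          refine ⟨rfl, ?_, ?_, ?_⟩
          · rw [pvRem, hrem, List.drop_eq_getElem_cons hlt, List.flatMap_cons]
            rw [pvRem, pvRem_zeros ps hne, List.getD_eq_getElem p "" hlt]
            simp
          · exact List.Forall₂.cons hlt (pv_forall2_zeros ps hne)
          · rw [List.zipWith_cons_cons, pv_zipWith_replicate]
        · left
          have hstep : pvStep (p :: ps) (i :: is)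
              (p.getD i "" :: List.zipWith (fun p i => p.getD i "") ps is)
              = (0 :: List.replicate ps.length 0,
                 p.getD 0 "" :: ps.map (fun p => p.getD 0 ""), true) := by
            simp only [pvStep]
            rw [hc, if_pos rfl, if_neg hlt, hidx0, hvals0]
          rw [hstep]
          refine ⟨rfl, ?_, ?_, ?_⟩
          · rw [pvRem, hrem, List.drop_eq_nil_of_le (by omega), List.flatMap_nil]
            simp
          · rw [List.length_cons, List.replicate_succ]
          · rfl
      · -- tail did not carry: the remaining list loses exactly its head
        right
        have hstep : pvStep (p :: ps) (i :: is)
            (p.getD i "" :: List.zipWith (fun p i => p.getD i "") ps is)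
            = (i :: (pvStep ps is (List.zipWith (fun p i => p.getD i "") ps is)).1,
               p.getD i "" :: (pvStep ps is (List.zipWith (fun p i => p.getD i "") ps is)).2.1,
               false) := by
          simp only [pvStep]
          rw [hc, if_neg Bool.false_ne_true]
        rw [hstep]
        refine ⟨rfl, ?_, ?_, ?_⟩
        · rw [pvRem, hrem, pvRem]
          simp
        · exact List.Forall₂.cons hpi hval2
        · rw [hzip2, List.zipWith_cons_cons]

-- the odometer loop yields the first n tuples of the remaining suffix
lemma pvOdo_eq (ordered : List String) (pools : List (List String)) :
    ∀ (n : Nat) (idx : List Nat) (vals : List String),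
      List.Forall₂ (fun (p : List String) (i : Nat) => i < p.length) pools idx →
      vals = List.zipWith (fun p i => p.getD i "") pools idx →
      n ≤ (pvRem pools idx).length →
      pvOdo ordered pools n idx vals
        = List.take n ((pvRem pools idx).map (fun t => ordered.zip t)) := by
  intro n
  induction n using Nat.strong_induction_on with
  | _ n ih =>
    intro idx vals hval hv hle
    match n with
    | 0 => simp [pvOdo]
    | 1 =>
        rcases pvStep_spec pools idx vals hval hv with ⟨_, hrem, _, _⟩ | ⟨_, hrem, _, _⟩ <;>
          rw [hrem] <;> simp [pvOdo]
    | (m + 2) =>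
        rcases pvStep_spec pools idx vals hval hv with ⟨_, hrem, _, _⟩ | ⟨hc, hrem, hvalid, hzip⟩
        · rw [hrem] at hle
          simp at hle
        · have hlen : m + 1 ≤ (pvRem pools (pvStep pools idx vals).1).length := by
            rw [hrem] at hle
            simpa using hle
          rw [pvOdo, hrem]
          simp only [List.map_cons, List.take_succ_cons]
          congr 1
          exact ih (m + 1) (by omega) _ _ hvalid hzip hlen

-- A's dicts, as item lists, are the zips of the value tuples (keys distinct and fresh)
lemma pvProd_zip (d : PySem.Dict String (List String)) :
    ∀ (rest : List String) (current : PySem.Dict String String),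
      rest.Nodup → (∀ k ∈ rest, current.contains k = false) →
      (pvProd (fun o => d.getD o []) rest current).map (fun c => c.items)
        = (pvProdT (rest.map (fun o => d.getD o []))).map (fun t => current.items ++ rest.zip t) := by
  intro rest
  induction rest with
  | nil =>
      intro current _ _
      simp [pvProd, pvProdT]
  | cons op rest ih =>
      intro current hnd hfresh
      have hfo : current.contains op = false := hfresh op (List.mem_cons_self ..)
      simp only [pvProd, pvProdT, List.map_cons, List.map_flatMap]
      congr 1
      funext fam
      rw [ih (current.insert op fam)
        (hnd.of_cons)
        (by
          intro k hk
          rw [PySem.Dict.contains_insert]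
          have hne : k ≠ op := by
            rintro rfl
            exact (List.nodup_cons.mp hnd).1 hk
          simp [hne, hfresh k (List.mem_cons_of_mem _ hk)])]
      rw [PySem.Dict.items_insert_of_not_contains _ _ hfo]
      simp [List.map_map, Function.comp_def, List.zip_cons_cons, List.append_assoc]

lemma pv_foldl_total : ∀ (ps : List (List String)) (acc : Int),
    ps.foldl (fun acc p => acc * PySem.List.len p) acc = acc * (pvLenT ps : Int) := by
  intro ps
  induction ps with
  | nil => intro acc; simp [pvLenT]
  | cons p ps ih =>
      intro acc
      rw [List.foldl_cons, ih, pvLenT]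
      simp [PySem.List.len_eq]
      ring

-- ===== VERDICT (by name: the statement is the Claim_ definition above) =====
theorem core_iter_family_assignments_spec : Claim_equal_core_iter_family_assignments := by
  intro family_options max_assignments _
  unfold Spec_core_iter_family_assignments core_iter_family_assignments core_iter_family_assignments_alt
  simp only []
  set d := PySem.Dict.ofList family_options with hd
  set ordered := PySem.List.sorted2 d.keys (fun op => PySem.List.len (d.getD op [])) (fun op => op) with hord
  set pools := ordered.map (fun op => d.getD op []) with hpools
  set total := pools.foldl (fun acc p => acc * PySem.List.len p) 1 with htot
  set count := if total < max_assignments then total else max_assignments with hcount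
  have hnd : ordered.Nodup := by
    rw [hord]
    exact (PySem.List.sorted2_perm d.keys
      (fun op => PySem.List.len (d.getD op [])) (fun op => op) false).symm.nodup
      (PySem.Dict.nodup_keys_ofList family_options)
  have hzipA := pvProd_zip d ordered PySem.Dict.empty hnd (fun k _ => PySem.Dict.contains_empty k)
  have hempty : (PySem.Dict.empty : PySem.Dict String String).items = [] := rfl
  rw [hempty] at hzipA
  simp only [List.nil_append] at hzipA
  rw [pvRecurseA_eq]
  simp only []
  rw [List.map_take, hzipA, ← hpools]
  have htotal : total = (pvLenT pools : Int) := by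
    rw [htot, pv_foldl_total, one_mul]
  by_cases hc0 : count.toNat = 0
  · rw [hc0]
    simp only [pvOdo]
    have hzero : (max_assignments - 0).toNat = 0 ∨ (pvProdT pools).length = 0 := by
      rw [pvProdT_length]
      by_cases hlt : total < max_assignments
      · right
        rw [hcount, if_pos hlt] at hc0
        omega
      · left
        rw [hcount, if_neg hlt] at hc0
        omega
    rcases hzero with h | h
    · rw [h, List.take_zero]
    · rw [List.length_eq_zero_iff.mp h]
      simp
  · have hpos : 0 < pvLenT pools := by
      by_cases hlt : total < max_assignments
      · rw [hcount, if_pos hlt] at hc0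
        omega
      · rw [hcount, if_neg hlt] at hc0
        omega
    have hne : ∀ p ∈ pools, p ≠ [] := pv_nonempty_of_lenT_pos pools hpos
    have hlenrem : count.toNat ≤ (pvRem pools (List.replicate pools.length 0)).length := by
      rw [pvRem_zeros pools hne, pvProdT_length]
      by_cases hlt : total < max_assignments
      · rw [hcount, if_pos hlt]
        omega
      · rw [hcount, if_neg hlt]
        omega
    rw [pvOdo_eq ordered pools count.toNat (List.replicate pools.length 0)
      (pools.map (fun p => p.getD 0 "")) (pv_forall2_zeros pools hne)
      (pv_zipWith_replicate pools).symm hlenrem]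
    rw [pvRem_zeros pools hne]
    by_cases hlt : total < max_assignments
    · rw [hcount, if_pos hlt]
      have hlenmap : ((pvProdT pools).map (fun t => ordered.zip t)).length = pvLenT pools := by
        rw [List.length_map, pvProdT_length]
      rw [List.take_of_length_le (by omega), List.take_of_length_le (by omega)]
    · rw [hcount, if_neg hlt]
      congr 1
      omega
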